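-- pv_equiv track=rewrite | github.com/joanarvs/ATP2022 | TPC5/tpc5.py | distribsexo
-- ===== SOURCE A (Python) =====
-- def distribsexo(pessoas):
--     distrib = {}
--     for p in pessoas:
--         if p[1] in distrib.keys():
--             distrib[p[1]] = distrib[p[1]] + 1
--         else:
--             distrib[p[1]] = 1
--     return distrib
-- ===== SOURCE B (Python) =====
-- def distribsexo(pessoas):
--     keys = list(dict.fromkeys(p[1] for p in pessoas))
--     return {k: sum(1 for p in pessoas if p[1] == k) for k in keys}
-- ===== Notes on version B (the rewrite author's own statement) =====
-- stated objective: alternative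
-- what changed: Replaces the single accumulating pass with conditional increment by a build-index-then-rescan shape: first dedup the second fields in first-occurrence order, then compute each key's count with a comprehension scanning the whole list.
import Mathlib
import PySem

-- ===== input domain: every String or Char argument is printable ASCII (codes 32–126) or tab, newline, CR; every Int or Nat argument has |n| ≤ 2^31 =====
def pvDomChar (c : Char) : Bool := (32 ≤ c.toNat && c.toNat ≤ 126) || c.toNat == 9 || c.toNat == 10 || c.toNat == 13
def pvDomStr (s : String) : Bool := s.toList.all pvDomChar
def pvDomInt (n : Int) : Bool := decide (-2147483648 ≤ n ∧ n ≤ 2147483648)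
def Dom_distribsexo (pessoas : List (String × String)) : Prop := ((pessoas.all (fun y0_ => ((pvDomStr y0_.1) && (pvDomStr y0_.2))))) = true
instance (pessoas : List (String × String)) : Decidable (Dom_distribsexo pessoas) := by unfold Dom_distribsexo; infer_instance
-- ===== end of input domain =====

-- B: instead of one accumulating pass with a conditional increment, dedup the keys first and then
-- count each by rescanning the list (alternative decomposition, same cost class).
-- ===== PORT A =====
def distribsexo (pessoas : List (String × String)) : List (String × Int) :=
  (pessoas.foldl (fun distrib p =>
      if (PySem.Dict.keys distrib).contains p.2 then
        PySem.Dict.insert distrib p.2 (PySem.Dict.getD distrib p.2 0 + 1)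
      else
        PySem.Dict.insert distrib p.2 1)
    PySem.Dict.empty).items

-- ===== PORT B =====
def distribsexo_alt (pessoas : List (String × String)) : List (String × Int) :=
  let keys := PySem.List.dedup (pessoas.map (fun p => p.2))
  keys.map (fun k => (k, ((pessoas.filter (fun p => p.2 == k)).length : Int)))

-- ===== PRECONDITION & SPEC =====
def Spec_distribsexo (pessoas : List (String × String)) (out : List (String × Int)) : Prop := out = distribsexo_alt pessoas
instance (pessoas : List (String × String)) (out : List (String × Int)) : Decidable (Spec_distribsexo pessoas out) := by unfold Spec_distribsexo; infer_instance

-- ===== CLAIM (what is proved, stated in full; the proofs are below) =====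
def Claim_equal_distribsexo : Prop := ∀ (pessoas : List (String × String)), Dom_distribsexo pessoas → Spec_distribsexo pessoas (distribsexo pessoas)

-- ===== LEMMAS AND PROOFS =====

-- ===== VERDICT (by name: the statement is the Claim_ definition above) =====
-- A's loop is the standard counter loop over the second fields.
theorem foldA_eq_counter_foldl (pessoas : List (String × String))
    (d : PySem.Dict String Int) :
    pessoas.foldl (fun distrib p =>
      if (PySem.Dict.keys distrib).contains p.2 then
        PySem.Dict.insert distrib p.2 (PySem.Dict.getD distrib p.2 0 + 1)
      else
        PySem.Dict.insert distrib p.2 1) d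
    = (pessoas.map (fun p => p.2)).foldl
        (fun distrib x => PySem.Dict.insert distrib x (PySem.Dict.getD distrib x 0 + 1)) d := by
  induction pessoas generalizing d with
  | nil => rfl
  | cons p rest ih =>
    simp only [List.foldl_cons, List.map_cons]
    by_cases h : (PySem.Dict.keys d).contains p.2
    · rw [if_pos h, ih]
    · rw [if_neg h, ih]
      have hc : d.contains p.2 = false := by
        rw [Bool.eq_false_iff]
        intro hcon
        exact h (List.contains_iff_mem.mpr ((PySem.Dict.contains_iff_mem_keys _ _).mp hcon))
      rw [PySem.Dict.getD_of_not_contains _ _ hc]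
      norm_num

theorem distribsexo_spec : Claim_equal_distribsexo := by
  intro pessoas _
  unfold Spec_distribsexo distribsexo distribsexo_alt
  rw [foldA_eq_counter_foldl, PySem.Dict.foldl_insert_getD_add_one_eq_counter,
    PySem.Dict.items_counter]
  simp only [PySem.List.dedup_eq_ofList]
  apply List.map_congr_left
  intro k _
  congr 1
  rw [List.count_eq_countP, List.countP_map, List.countP_eq_length_filter]
  rfl
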